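-- pv_equiv track=rewrite | github.com/Enether/lots_of_code | hackerearth/code_arena/matrix_sum.py | find_lower_part
-- ===== SOURCE A (Python) =====
-- def find_lower_part(n):
--     # Find the lower part of matrix's sum
--     n -= 1
--     mp = 1
--     sum = 0
--     while n != 0:
--         sum += mp * n
--         n-=1
--         mp+=1
--     return sum
-- ===== SOURCE B (Python) =====
-- def find_lower_part(n):
--     # closed form: sum_{k=1}^{n-1} k*(n-k) = (n^3 - n) / 6
--     return (n * n * n - n) // 6
-- ===== Notes on version B (the rewrite author's own statement) =====
-- stated objective: faster
-- what changed: Replaces the O(n) accumulation loop by the closed-form polynomial (n^3 - n) // 6.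
-- outside the precondition, e.g. on find_lower_part(0): A does not finish within the time limit, B returns 0
import Mathlib
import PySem

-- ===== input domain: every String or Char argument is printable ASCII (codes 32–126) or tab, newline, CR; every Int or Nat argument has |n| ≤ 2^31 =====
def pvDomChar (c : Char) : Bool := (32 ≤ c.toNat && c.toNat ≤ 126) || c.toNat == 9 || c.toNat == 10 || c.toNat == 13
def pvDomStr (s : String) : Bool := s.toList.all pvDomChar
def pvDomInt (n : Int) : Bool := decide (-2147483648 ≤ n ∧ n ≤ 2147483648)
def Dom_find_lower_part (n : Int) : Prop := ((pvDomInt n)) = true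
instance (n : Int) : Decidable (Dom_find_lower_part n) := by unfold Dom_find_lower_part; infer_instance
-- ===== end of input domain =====

-- B replaces A's O(n) accumulation loop by the closed form (n^3 - n) // 6.

-- ===== PORT A =====
-- A's while loop runs exactly (n-1) times when n ≥ 1 (outside Pre_ it never terminates
-- in Python), so the fuel (n-1).toNat counts its iterations exactly on Pre_.
def find_lower_part_loop : Nat → Int → Int → Int → Int
  | 0, _, _, sum => sum
  | k + 1, n, mp, sum => find_lower_part_loop k (n - 1) (mp + 1) (sum + mp * n)

def find_lower_part (n : Int) : Int :=
  find_lower_part_loop (n - 1).toNat (n - 1) 1 0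

-- ===== PORT B =====
def find_lower_part_alt (n : Int) : Int :=
  PySem.Int.floordiv (n * n * n - n) 6

-- ===== PRECONDITION & SPEC =====
-- Pre_ excludes n ≤ 0, where A's while loop never terminates (n decremented past 0).
def Pre_find_lower_part (n : Int) : Prop := 1 ≤ n
instance (n : Int) : Decidable (Pre_find_lower_part n) := by unfold Pre_find_lower_part; infer_instance
def pvWitness_find_lower_part : Int := (5)

def Spec_find_lower_part (n : Int) (out : Int) : Prop := out = find_lower_part_alt n
instance (n : Int) (out : Int) : Decidable (Spec_find_lower_part n out) := by unfold Spec_find_lower_part; infer_instance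

-- ===== CLAIM =====
def Claim_equal_find_lower_part : Prop := ∀ (n : Int), Dom_find_lower_part n → Pre_find_lower_part n → Spec_find_lower_part n (find_lower_part n)

-- ===== LEMMAS AND PROOFS =====
theorem loop_invariant (k : Nat) : ∀ (mp sum : Int),
    6 * find_lower_part_loop k (k : Int) mp sum
      = 6 * sum + 3 * (mp + k) * k * (k + 1) - k * (k + 1) * (2 * k + 1) := by
  induction k with
  | zero => intro mp sum; simp [find_lower_part_loop]
  | succ k ih =>
      intro mp sum
      have h : ((k + 1 : Nat) : Int) - 1 = (k : Int) := by push_cast; ring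
      simp only [find_lower_part_loop, h]
      rw [ih]
      push_cast
      ring

-- ===== VERDICT =====
theorem find_lower_part_spec : Claim_equal_find_lower_part := by
  intro n _ hpre
  unfold Pre_find_lower_part at hpre
  unfold Spec_find_lower_part find_lower_part find_lower_part_alt
  have hm : ((n - 1).toNat : Int) = n - 1 := Int.toNat_of_nonneg (by omega)
  have h6 : 6 * find_lower_part_loop (n - 1).toNat (n - 1) 1 0 = n * n * n - n := by
    have := loop_invariant (n - 1).toNat 1 0
    rw [hm] at this
    rw [this]
    ring
  have : n * n * n - n = 6 * find_lower_part_loop (n - 1).toNat (n - 1) 1 0 := h6.symm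
  rw [this, PySem.Int.floordiv_eq_ediv_of_pos (by norm_num)]
  omega
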